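-- pv_equiv track=rewrite | github.com/exucutional/bioinformatics | problem28/solve.py | coloured_edges
-- ===== SOURCE A (Python) =====
-- def chromosome_to_cycle(chromosome):
--     nodes = [0]*len(chromosome)*2
--     for i in range(len(chromosome)):
--         if chromosome[i] > 0:
--             nodes[2*i]   = 2*chromosome[i]-1
--             nodes[2*i+1] = 2*chromosome[i]
--         else:
--             nodes[2*i]   = -2*chromosome[i]
--             nodes[2*i+1] = -2*chromosome[i]-1
--
--     return nodes
--
-- def coloured_edges(genome):
--     edges = set()
--     for chromosome in genome:
--         nodes = chromosome_to_cycle(chromosome)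
--         nodes.append(nodes[0])
--         for i in range(len(chromosome)):
--             edges.add((nodes[2*i+1], nodes[2*i+2]))
--
--     return edges
-- ===== SOURCE B (Python) =====
-- def coloured_edges(genome):
--     edges = set()
--     for chromosome in genome:
--         blocks = list(chromosome)
--         blocks.append(blocks[0])
--         for prev, nxt in zip(blocks, blocks[1:]):
--             tail = 2 * prev if prev > 0 else -2 * prev - 1
--             head = 2 * nxt - 1 if nxt > 0 else -2 * nxt
--             edges.add((tail, head))
--     return edges
-- ===== Notes on version B (the rewrite author's own statement) =====
-- stated objective: alternative
-- what changed: B drops the intermediate doubled-node cycle array entirely: instead of building chromosome_to_cycle's 2n-element array by index assignment and then indexing back into it, B appends the first block and zips adjacent blocks, computing each edge's tail/head node inline from the block signs.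
import Mathlib
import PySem

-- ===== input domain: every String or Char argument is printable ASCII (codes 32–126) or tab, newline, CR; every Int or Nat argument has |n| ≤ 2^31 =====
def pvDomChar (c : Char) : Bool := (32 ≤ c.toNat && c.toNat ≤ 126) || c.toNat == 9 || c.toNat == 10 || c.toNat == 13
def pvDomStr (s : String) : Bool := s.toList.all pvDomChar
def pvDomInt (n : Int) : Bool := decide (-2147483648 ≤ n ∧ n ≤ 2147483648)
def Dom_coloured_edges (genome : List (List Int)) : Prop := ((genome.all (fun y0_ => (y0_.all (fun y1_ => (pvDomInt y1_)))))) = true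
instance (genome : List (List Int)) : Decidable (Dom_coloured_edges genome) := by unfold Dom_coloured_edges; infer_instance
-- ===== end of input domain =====

-- B avoids A's intermediate 2n-node cycle array: it pairs each block with its cyclic successor and
-- computes the two endpoint nodes inline (alternative decomposition, same asymptotic cost).

-- ===== PORT A =====
def chromosome_to_cycle (chromosome : List Int) : List Int :=
  (PySem.List.pyRange 0 (chromosome.length : Int) 1).foldl (fun nodes i =>
    let ci := PySem.List.pyGetD chromosome i 0
    if ci > 0 then
      PySem.List.pySetD (PySem.List.pySetD nodes (2*i) (2*ci - 1)) (2*i + 1) (2*ci)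
    else
      PySem.List.pySetD (PySem.List.pySetD nodes (2*i) (-2*ci)) (2*i + 1) (-2*ci - 1))
    (List.replicate (chromosome.length * 2) 0)

def coloured_edges (genome : List (List Int)) : List (Int × Int) :=
  genome.foldl (fun edges chromosome =>
    let nodes0 := chromosome_to_cycle chromosome
    -- nodes.append(nodes[0]); nodes[0] raises IndexError on an empty chromosome (excluded by Pre_)
    let nodes := nodes0 ++ [PySem.List.pyGetD nodes0 0 0]
    (PySem.List.pyRange 0 (chromosome.length : Int) 1).foldl (fun e i =>
      PySem.Set.add e (PySem.List.pyGetD nodes (2*i + 1) 0, PySem.List.pyGetD nodes (2*i + 2) 0)) edges)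
    PySem.Set.empty

-- ===== PORT B =====
def coloured_edges_alt (genome : List (List Int)) : List (Int × Int) :=
  genome.foldl (fun edges chromosome =>
    -- blocks = list(chromosome); blocks.append(blocks[0])  (blocks[0] raises on empty chromosome, excluded by Pre_)
    let blocks := chromosome ++ [PySem.List.pyGetD chromosome 0 0]
    (blocks.zip (PySem.List.slice blocks (some 1) none)).foldl (fun e p =>
      let t := if p.1 > 0 then 2*p.1 else -2*p.1 - 1
      let h := if p.2 > 0 then 2*p.2 - 1 else -2*p.2
      PySem.Set.add e (t, h)) edges)
    PySem.Set.empty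

-- ===== PRECONDITION & SPEC =====
-- Pre_ excludes genomes containing an empty chromosome: there both A and B raise IndexError
-- (A on nodes[0], B on blocks[0]).
def Pre_coloured_edges (genome : List (List Int)) : Prop := ∀ c ∈ genome, c ≠ []
instance (genome : List (List Int)) : Decidable (Pre_coloured_edges genome) := by unfold Pre_coloured_edges; infer_instance
def pvWitness_coloured_edges : List (List Int) := [[1, -2, 3], [-4]]

def Spec_coloured_edges (genome : List (List Int)) (out : List (Int × Int)) : Prop := out = coloured_edges_alt genome
instance (genome : List (List Int)) (out : List (Int × Int)) : Decidable (Spec_coloured_edges genome out) := by unfold Spec_coloured_edges; infer_instance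

-- ===== CLAIM (what is proved, stated in full; the proofs are below) =====
def Claim_equal_coloured_edges : Prop := ∀ (genome : List (List Int)), Dom_coloured_edges genome → Pre_coloured_edges genome → Spec_coloured_edges genome (coloured_edges genome)

-- ===== LEMMAS AND PROOFS =====

def pvHead (b : Int) : Int := if b > 0 then 2*b - 1 else -2*b
def pvTail (b : Int) : Int := if b > 0 then 2*b else -2*b - 1
def pvFlat (ch : List Int) : List Int := ch.flatMap (fun b => [pvHead b, pvTail b])
def pvBody (xs : List Int) (nodes : List Int) (i : Int) : List Int :=
  if PySem.List.pyGetD xs i 0 > 0 then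
    PySem.List.pySetD (PySem.List.pySetD nodes (2*i) (2*(PySem.List.pyGetD xs i 0) - 1)) (2*i + 1) (2*(PySem.List.pyGetD xs i 0))
  else PySem.List.pySetD (PySem.List.pySetD nodes (2*i) (-2*(PySem.List.pyGetD xs i 0))) (2*i + 1) (-2*(PySem.List.pyGetD xs i 0) - 1)

theorem cycle_as_body (ch : List Int) :
    chromosome_to_cycle ch = (PySem.List.pyRange 0 (ch.length : Int) 1).foldl (pvBody ch) (List.replicate (ch.length * 2) 0) := rfl

theorem body_length (xs nodes : List Int) (i : Int) : (pvBody xs nodes i).length = nodes.length := by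
  unfold pvBody; split <;> simp [PySem.List.length_pySetD]

theorem body_append_left (xs : List Int) (b : Int) (nodes : List Int) (i : Int)
    (h0 : 0 ≤ i) (h : i < (xs.length : Int)) : pvBody (xs ++ [b]) nodes i = pvBody xs nodes i := by
  have : PySem.List.pyGetD (xs ++ [b]) i 0 = PySem.List.pyGetD xs i 0 := by
    rw [PySem.List.pyGetD_of_nonneg _ 0 h0, PySem.List.pyGetD_of_nonneg _ 0 h0]
    exact List.getD_append _ _ _ _ (by omega)
  unfold pvBody; rw [this]

theorem body_frame (xs nodes t : List Int) (i : Int) (h0 : 0 ≤ i) (h : 2*i + 2 ≤ (nodes.length : Int)) :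
    pvBody xs (nodes ++ t) i = pvBody xs nodes i ++ t := by
  have e1 : ∀ (j : Int) (v : Int), 0 ≤ j → j < (nodes.length : Int) →
      PySem.List.pySetD (nodes ++ t) j v = PySem.List.pySetD nodes j v ++ t := by
    intro j v hj hjl
    rw [PySem.List.pySetD_of_nonneg _ _ hj, PySem.List.pySetD_of_nonneg _ _ hj]
    exact List.set_append_left _ _ (by omega)
  have e2 : ∀ (j : Int) (v w : Int), 0 ≤ j → j + 1 < (nodes.length : Int) →
      PySem.List.pySetD (PySem.List.pySetD (nodes ++ t) j v) (j+1) w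
        = PySem.List.pySetD (PySem.List.pySetD nodes j v) (j+1) w ++ t := by
    intro j v w hj hjl
    rw [e1 j v hj (by omega)]
    rw [PySem.List.pySetD_of_nonneg _ _ (by omega : (0:Int) ≤ j+1),
        PySem.List.pySetD_of_nonneg _ _ (by omega : (0:Int) ≤ j+1)]
    exact List.set_append_left _ _ (by simp [PySem.List.pySetD_of_nonneg _ _ hj]; omega)
  unfold pvBody; split <;> rw [e2 (2*i) _ _ (by omega) (by omega)]

theorem fold_frame (xs : List Int) (b : Int) (t : List Int) :
    ∀ (l : List Int) (init : List Int), (∀ i ∈ l, 0 ≤ i ∧ i < (xs.length : Int)) → init.length = 2*xs.length →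
    l.foldl (pvBody (xs ++ [b])) (init ++ t) = l.foldl (pvBody xs) init ++ t := by
  intro l
  induction l with
  | nil => intro init _ _; simp
  | cons j l ih =>
    intro init hmem hlen
    have hj := hmem j (by simp)
    simp only [List.foldl_cons]
    rw [body_append_left xs b _ j hj.1 hj.2, body_frame xs init t j hj.1 (by omega)]
    exact ih _ (fun i hi => hmem i (by simp [hi])) (by rw [body_length]; exact hlen)

theorem pvFlat_length (ch : List Int) : (pvFlat ch).length = 2 * ch.length := by
  induction ch with
  | nil => rfl
  | cons x xs ih => simp [pvFlat] at ih ⊢; omega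


theorem flat_get_even (ch : List Int) (k : Nat) (h : k < ch.length) :
    (pvFlat ch).getD (2*k) 0 = pvHead (ch[k]) := by
  induction ch generalizing k with
  | nil => simp at h
  | cons b t ih =>
    cases k with
    | zero => simp [pvFlat]
    | succ k =>
      have : 2*(k+1) = (2*k)+1+1 := by omega
      rw [this]
      simpa [pvFlat] using ih k (by simpa using h)

theorem flat_get_odd (ch : List Int) (k : Nat) (h : k < ch.length) :
    (pvFlat ch).getD (2*k + 1) 0 = pvTail (ch[k]) := by
  induction ch generalizing k with
  | nil => simp at h
  | cons b t ih =>
    cases k with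
    | zero => simp [pvFlat]
    | succ k =>
      have : 2*(k+1)+1 = (2*k+1)+1+1 := by omega
      rw [this]
      simpa [pvFlat] using ih k (by simpa using h)

theorem cycle_eq_flat (ch : List Int) : chromosome_to_cycle ch = pvFlat ch := by
  induction ch using List.reverseRecOn with
  | nil => rfl
  | append_singleton cs b ih =>
    rw [cycle_as_body] at ih ⊢
    have hn : ((cs ++ [b]).length : Int) = (cs.length : Int) + 1 := by simp
    rw [hn, PySem.List.pyRange_one_succ_right (by positivity), List.foldl_append]
    have hrep : List.replicate ((cs ++ [b]).length * 2) (0:Int)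
        = List.replicate (cs.length * 2) 0 ++ [0, 0] := by
      have : (cs ++ [b]).length * 2 = cs.length * 2 + 2 := by simp; ring
      rw [this, List.replicate_add]
      rfl
    rw [hrep, fold_frame cs b [0,0] _ _ (fun i hi => by
        have := PySem.List.mem_pyRange_one.mp hi; omega) (by rw [List.length_replicate]; omega), ih]
    simp only [List.foldl_cons, List.foldl_nil]
    have hget : PySem.List.pyGetD (cs ++ [b]) (cs.length : Int) 0 = b := by
      rw [PySem.List.pyGetD_of_nonneg _ 0 (by positivity)]
      simp
    have hflen := pvFlat_length cs
    have hset : ∀ (v w : Int), PySem.List.pySetD (PySem.List.pySetD (pvFlat cs ++ [0,0]) (2*(cs.length:Int)) v) (2*(cs.length:Int)+1) w = pvFlat cs ++ [v, w] := by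
      intro v w
      rw [PySem.List.pySetD_of_nonneg _ _ (by positivity), PySem.List.pySetD_of_nonneg _ _ (by positivity)]
      have h1 : ((2*(cs.length:Int)).toNat) = (pvFlat cs).length := by omega
      have h2 : ((2*(cs.length:Int)+1).toNat) = (pvFlat cs).length + 1 := by omega
      rw [h1, h2, List.set_append_right _ _ (le_refl _)]
      have : (pvFlat cs).length ≤ (pvFlat cs).length + 1 := by omega
      rw [List.set_append_right _ _ (by simp)]
      simp
    have hfs : pvFlat (cs ++ [b]) = pvFlat cs ++ [pvHead b, pvTail b] := by
      simp [pvFlat]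
    rw [hfs]
    unfold pvBody
    rw [hget]
    by_cases hb : b > 0 <;> simp [hb, hset, pvHead, pvTail]

theorem foldl_add_of_map_eq {α β : Type} (l1 : List α) (l2 : List β)
    (f : α → Int × Int) (g : β → Int × Int) (init : List (Int × Int))
    (h : l1.map f = l2.map g) :
    l1.foldl (fun e x => PySem.Set.add e (f x)) init
      = l2.foldl (fun e x => PySem.Set.add e (g x)) init := by
  rw [← List.foldl_map (f := f), ← List.foldl_map (f := g), h]

theorem inner_eq (ch : List Int) (hc : ch ≠ []) (edges : List (Int × Int)) :
    (PySem.List.pyRange 0 (ch.length : Int) 1).foldl (fun e i =>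
      PySem.Set.add e
        (PySem.List.pyGetD (chromosome_to_cycle ch ++ [PySem.List.pyGetD (chromosome_to_cycle ch) 0 0]) (2*i + 1) 0,
         PySem.List.pyGetD (chromosome_to_cycle ch ++ [PySem.List.pyGetD (chromosome_to_cycle ch) 0 0]) (2*i + 2) 0)) edges
    = ((ch ++ [PySem.List.pyGetD ch 0 0]).zip (PySem.List.slice (ch ++ [PySem.List.pyGetD ch 0 0]) (some 1) none)).foldl
        (fun e p => PySem.Set.add e
          ((if p.1 > 0 then 2*p.1 else -2*p.1 - 1), (if p.2 > 0 then 2*p.2 - 1 else -2*p.2))) edges := by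
  have hn : 0 < ch.length := List.length_pos_iff.mpr hc
  rw [cycle_eq_flat, PySem.List.slice_from_one]
  have hch0 : PySem.List.pyGetD ch 0 0 = ch[0] := by
    rw [PySem.List.pyGetD_ofNat']
    simp [List.getD, List.getElem?_eq_getElem hn]
  have hfl0 : PySem.List.pyGetD (pvFlat ch) 0 0 = pvHead ch[0] := by
    rw [PySem.List.pyGetD_ofNat']
    simpa using flat_get_even ch 0 hn
  rw [hch0, hfl0]
  apply foldl_add_of_map_eq
  apply List.ext_getElem
  · simp [PySem.List.length_pyRange_one]
  · intro k h1 h2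
    have hk : k < ch.length := by
      simpa [PySem.List.length_pyRange_one] using h1
    have hflen := pvFlat_length ch
    simp only [List.getElem_map, List.getElem_zip, PySem.List.getElem_pyRange_one, zero_add]
    have e1 : PySem.List.pyGetD (pvFlat ch ++ [pvHead ch[0]]) (2*(k:Int) + 1) 0 = pvTail (ch[k]) := by
      have : (2*(k:Int) + 1) = ((2*k+1 : Nat) : Int) := by push_cast; ring
      rw [this, PySem.List.pyGetD_natCast, List.getD_append _ _ _ _ (by omega)]
      exact flat_get_odd ch k hk
    have etail : (ch ++ [ch[0]]).tail[k]'(by simp; omega) = (ch ++ [ch[0]])[k+1]'(by simp; omega) := List.getElem_tail _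
    have ehead : (ch ++ [ch[0]])[k]'(by simp; omega) = ch[k] := List.getElem_append_left hk
    have e2 : PySem.List.pyGetD (pvFlat ch ++ [pvHead ch[0]]) (2*(k:Int) + 2) 0
        = pvHead ((ch ++ [ch[0]])[k+1]'(by simp; omega)) := by
      have hcast : (2*(k:Int) + 2) = ((2*(k+1) : Nat) : Int) := by push_cast; ring
      rw [hcast, PySem.List.pyGetD_natCast]
      by_cases hlt : k + 1 < ch.length
      · rw [List.getD_append _ _ _ _ (by omega)]
        rw [flat_get_even ch (k+1) hlt]
        congr 1
        exact (List.getElem_append_left hlt).symm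
      · have hkn : k + 1 = ch.length := by omega
        have hidx : 2*(k+1) - (pvFlat ch).length = 0 := by omega
        have : (pvFlat ch ++ [pvHead ch[0]]).getD (2*(k+1)) 0 = pvHead ch[0] := by
          simp [List.getD, List.getElem?_append_right (by omega : (pvFlat ch).length ≤ 2*(k+1)), hidx]
        rw [this]
        congr 1
        rw [List.getElem_append_right (by omega)]
        simp [hkn]
    rw [e1, e2, etail, ehead]
    simp [pvHead, pvTail]

theorem final (genome : List (List Int)) (hpre : ∀ c ∈ genome, c ≠ []) :
    coloured_edges genome = coloured_edges_alt genome := by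
  unfold coloured_edges coloured_edges_alt
  apply PySem.List.foldl_congr_mem
  intro acc x hx
  exact inner_eq x (hpre x hx) acc

-- ===== VERDICT (by name: the statement is the Claim_ definition above) =====
theorem coloured_edges_spec : Claim_equal_coloured_edges := by
  intro genome _ hpre
  unfold Spec_coloured_edges
  exact final genome hpre
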